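-- pv_equiv track=rewrite | github.com/nickmeinhold/the-dreaming-repo | src/immunity.py | _find_sensitive_files
-- ===== SOURCE A (Python) =====
-- SENSITIVE_PATHS = [
--     "CLAUDE.md",                  # identity
--     "src/",                       # vital organs
--     "state/",                     # consciousness
--     "dreams/",                    # dream journal
--     "memories/",                  # long-term memory
--     ".github/workflows/",         # heartbeat
--     "README.md",                  # face (auto-generated)
-- ]
--
-- def _find_sensitive_files(files: list[str]) -> list[str]:
--     """Find which files touch sensitive paths."""
--     sensitive = []
--     for filepath in files:
--         for spath in SENSITIVE_PATHS:
--             if spath.endswith("/"):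
--                 if filepath.startswith(spath):
--                     sensitive.append(filepath)
--                     break
--             else:
--                 if filepath == spath:
--                     sensitive.append(filepath)
--                     break
--     return sensitive
-- ===== SOURCE B (Python) =====
-- SENSITIVE_PATHS = [
--     "CLAUDE.md",                  # identity
--     "src/",                       # vital organs
--     "state/",                     # consciousness
--     "dreams/",                    # dream journal
--     "memories/",                  # long-term memory
--     ".github/workflows/",         # heartbeat
--     "README.md",                  # face (auto-generated)
-- ]
--
-- _DIRS = frozenset(p for p in SENSITIVE_PATHS if p.endswith("/"))
-- _EXACT = frozenset(p for p in SENSITIVE_PATHS if not p.endswith("/"))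
--
-- def _find_sensitive_files(files: list[str]) -> list[str]:
--     """Find which files touch sensitive paths."""
--     sensitive = []
--     for f in files:
--         # a file is sensitive iff its whole name is an exact sensitive name, or
--         # some slash-terminated prefix of it is a sensitive directory: so scan
--         # the file path's own slash positions instead of the pattern list.
--         if f in _EXACT or any(c == "/" and f[: i + 1] in _DIRS for i, c in enumerate(f)):
--             sensitive.append(f)
--     return sensitive
-- ===== Notes on version B (the rewrite author's own statement) =====
-- stated objective: alternative
-- what changed: Instead of testing each file against every entry of SENSITIVE_PATHS (inner loop over the pattern list with per-pattern endswith classification), B scans each file path's own slash positions and checks each slash-terminated prefix against a precomputed directory set, plus one exact-name set lookup; the loop over patterns disappears.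
import Mathlib
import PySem

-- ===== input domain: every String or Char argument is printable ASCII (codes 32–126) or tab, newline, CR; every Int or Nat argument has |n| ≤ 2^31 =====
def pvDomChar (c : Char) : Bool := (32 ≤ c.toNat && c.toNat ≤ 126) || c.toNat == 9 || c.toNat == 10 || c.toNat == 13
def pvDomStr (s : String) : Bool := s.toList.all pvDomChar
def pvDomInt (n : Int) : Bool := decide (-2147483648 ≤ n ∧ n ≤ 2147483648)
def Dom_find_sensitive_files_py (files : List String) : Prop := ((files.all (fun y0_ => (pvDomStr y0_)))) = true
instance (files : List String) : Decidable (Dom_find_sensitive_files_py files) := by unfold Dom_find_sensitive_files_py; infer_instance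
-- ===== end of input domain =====

-- B replaces A's per-file loop over the pattern list by a scan of the file path's own slash
-- positions, testing each slash-terminated prefix against a precomputed directory set plus one
-- exact-name set lookup (alternative algorithm; same asymptotic cost).


-- ===== PORT A =====
def pvSensitivePaths : List String :=
  ["CLAUDE.md", "src/", "state/", "dreams/", "memories/", ".github/workflows/", "README.md"]

-- A's inner 'for spath in SENSITIVE_PATHS' loop with its break: returns true iff the break fires.
def pvInnerLoop (filepath : String) : List String → Bool
  | [] => false
  | spath :: rest =>
    if PySem.Str.endswith spath "/" then
      if PySem.Str.startswith filepath spath then true else pvInnerLoop filepath rest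
    else
      if filepath == spath then true else pvInnerLoop filepath rest

def find_sensitive_files_py (files : List String) : List String :=
  files.foldl (fun sensitive filepath =>
    if pvInnerLoop filepath pvSensitivePaths then sensitive ++ [filepath] else sensitive) []

-- ===== PORT B =====
def pvDirs : PySem.Set String := PySem.Set.ofList (pvSensitivePaths.filter (fun p => PySem.Str.endswith p "/"))
def pvExact : PySem.Set String := PySem.Set.ofList (pvSensitivePaths.filter (fun p => !PySem.Str.endswith p "/"))

-- Source B's per-file test: exact-name lookup, or some slash position i with f[:i+1] in the dir set.
def pvSensitiveTest (f : String) : Bool :=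
  PySem.Set.contains pvExact f ||
  (PySem.List.enumerate f.toList 0).any (fun p =>
    p.2 == '/' && PySem.Set.contains pvDirs (PySem.Str.slice f none (some (p.1 + 1))))

def find_sensitive_files_py_alt (files : List String) : List String :=
  files.foldl (fun sensitive f => if pvSensitiveTest f then sensitive ++ [f] else sensitive) []

-- ===== PRECONDITION & SPEC =====
def Spec_find_sensitive_files_py (files : List String) (out : List String) : Prop := out = find_sensitive_files_py_alt files
instance (files : List String) (out : List String) : Decidable (Spec_find_sensitive_files_py files out) := by unfold Spec_find_sensitive_files_py; infer_instance

-- ===== CLAIM (what is proved, stated in full; the proofs are below) =====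
def Claim_equal_find_sensitive_files_py : Prop := ∀ (files : List String), Dom_find_sensitive_files_py files → Spec_find_sensitive_files_py files (find_sensitive_files_py files)

-- ===== LEMMAS AND PROOFS =====

-- f[:k+1] on the list side
theorem pvSlice_toList (f : String) (k : Nat) :
    (PySem.Str.slice f none (some ((k : Int) + 1))).toList = f.toList.take (k + 1) := by
  rw [show ((k : Int) + 1) = ((k + 1 : Nat) : Int) by push_cast; ring]
  rw [PySem.Str.toList_slice, PySem.Chars.slice_eq_listSlice, PySem.List.slice_to_natCast]

-- For a pattern d ending in '/', 'f starts with d' is exactly 'some slash position k of f has f[:k+1] = d'.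
theorem pv_dir_iff (f d : String) (hd : d.toList ≠ []) (hlast : d.toList.getLast hd = '/') :
    PySem.Str.startswith f d = true ↔
      ∃ k, k < f.toList.length ∧ f.toList[k]? = some '/' ∧
        PySem.Str.slice f none (some ((k : Int) + 1)) = d := by
  have hsw : PySem.Str.startswith f d = true ↔ d.toList <+: f.toList := by
    rw [PySem.Str.startswith_eq, PySem.Chars.startswith_iff]
  rw [hsw]
  constructor
  · intro hp
    have htake : d.toList = f.toList.take d.toList.length := List.prefix_iff_eq_take.mp hp
    have hL : 0 < d.toList.length := List.length_pos_iff.mpr hd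
    have hle : d.toList.length ≤ f.toList.length := hp.length_le
    refine ⟨d.toList.length - 1, by omega, ?_, ?_⟩
    · have h1 : d.toList.getLast hd = d.toList[d.toList.length - 1] := List.getLast_eq_getElem hd
      have h2 : d.toList[d.toList.length - 1]'(by omega) =
          f.toList[d.toList.length - 1]'(by omega) := by
        have h3 := List.getElem_take (xs := f.toList) (i := d.toList.length - 1)
          (j := d.toList.length) (h := by rw [← htake]; omega)
        calc d.toList[d.toList.length - 1]'(by omega)
            = (f.toList.take d.toList.length)[d.toList.length - 1]'(by rw [← htake]; omega) := by
              congr 1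
          _ = f.toList[d.toList.length - 1]'(by omega) := h3
      rw [List.getElem?_eq_getElem (by omega : d.toList.length - 1 < f.toList.length)]
      rw [← h2, ← h1, hlast]
    · apply String.toList_inj.mp
      rw [pvSlice_toList, Nat.sub_add_cancel hL]
      exact htake.symm
  · rintro ⟨k, h, hs, heq⟩
    have hk : d.toList = f.toList.take (k + 1) := by rw [← heq, pvSlice_toList]
    rw [hk]
    exact List.take_prefix _ _

-- distribute the 5-way disjunction out of the slash-position existential
theorem pv_dist (n : Nat) (P : Nat → Prop) (A B C D E : Nat → Prop) :
    (∃ k, k < n ∧ P k ∧ (A k ∨ B k ∨ C k ∨ D k ∨ E k)) ↔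
      ((∃ k, k < n ∧ P k ∧ A k) ∨ (∃ k, k < n ∧ P k ∧ B k) ∨
       (∃ k, k < n ∧ P k ∧ C k) ∨ (∃ k, k < n ∧ P k ∧ D k) ∨
       (∃ k, k < n ∧ P k ∧ E k)) := by
  constructor
  · rintro ⟨k, h, hp, (h1 | h2 | h3 | h4 | h5)⟩
    · exact Or.inl ⟨k, h, hp, h1⟩
    · exact Or.inr (Or.inl ⟨k, h, hp, h2⟩)
    · exact Or.inr (Or.inr (Or.inl ⟨k, h, hp, h3⟩))
    · exact Or.inr (Or.inr (Or.inr (Or.inl ⟨k, h, hp, h4⟩)))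
    · exact Or.inr (Or.inr (Or.inr (Or.inr ⟨k, h, hp, h5⟩)))
  · rintro (⟨k, h, hp, h1⟩ | ⟨k, h, hp, h2⟩ | ⟨k, h, hp, h3⟩ | ⟨k, h, hp, h4⟩ | ⟨k, h, hp, h5⟩)
    · exact ⟨k, h, hp, Or.inl h1⟩
    · exact ⟨k, h, hp, Or.inr (Or.inl h2)⟩
    · exact ⟨k, h, hp, Or.inr (Or.inr (Or.inl h3))⟩
    · exact ⟨k, h, hp, Or.inr (Or.inr (Or.inr (Or.inl h4)))⟩
    · exact ⟨k, h, hp, Or.inr (Or.inr (Or.inr (Or.inr h5)))⟩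

-- B's slash scan hits iff some slash-terminated prefix of f equals one of the five directories
set_option maxHeartbeats 1000000 in
theorem pv_any_iff (f : String) :
    ((PySem.List.enumerate f.toList 0).any (fun p =>
        p.2 == '/' && PySem.Set.contains pvDirs (PySem.Str.slice f none (some (p.1 + 1)))) = true) ↔
      (PySem.Str.startswith f "src/" = true ∨ PySem.Str.startswith f "state/" = true ∨
       PySem.Str.startswith f "dreams/" = true ∨ PySem.Str.startswith f "memories/" = true ∨
       PySem.Str.startswith f ".github/workflows/" = true) := by
  have hd : pvDirs = ["src/", "state/", "dreams/", "memories/", ".github/workflows/"] := by decide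
  have step : ∀ p ∈ PySem.List.enumerate f.toList 0,
      ((p.2 == '/' && PySem.Set.contains pvDirs (PySem.Str.slice f none (some (p.1 + 1)))) = true) ↔
      (p.2 = '/' ∧ (PySem.Str.slice f none (some (p.1 + 1)) = "src/" ∨
        PySem.Str.slice f none (some (p.1 + 1)) = "state/" ∨
        PySem.Str.slice f none (some (p.1 + 1)) = "dreams/" ∨
        PySem.Str.slice f none (some (p.1 + 1)) = "memories/" ∨
        PySem.Str.slice f none (some (p.1 + 1)) = ".github/workflows/")) := by
    intro p _
    rw [Bool.and_eq_true, beq_iff_eq, hd]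
    simp [PySem.Set.contains]
  rw [List.any_eq_true]
  have hmid : (∃ p ∈ PySem.List.enumerate f.toList 0,
      (p.2 == '/' && PySem.Set.contains pvDirs (PySem.Str.slice f none (some (p.1 + 1)))) = true) ↔
      (∃ k, k < f.toList.length ∧ f.toList[k]? = some '/' ∧
        (PySem.Str.slice f none (some ((k : Int) + 1)) = "src/" ∨
         PySem.Str.slice f none (some ((k : Int) + 1)) = "state/" ∨
         PySem.Str.slice f none (some ((k : Int) + 1)) = "dreams/" ∨
         PySem.Str.slice f none (some ((k : Int) + 1)) = "memories/" ∨
         PySem.Str.slice f none (some ((k : Int) + 1)) = ".github/workflows/")) := by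
    constructor
    · rintro ⟨p, hp, hc⟩
      rw [step p hp] at hc
      rw [PySem.List.mem_enumerate_iff] at hp
      obtain ⟨k, hk, rfl⟩ := hp
      simp only [zero_add] at hc
      exact ⟨k, hk, by rw [List.getElem?_eq_getElem hk, hc.1], hc.2⟩
    · rintro ⟨k, hk, hs, hor⟩
      have hv : f.toList[k] = '/' := by
        rw [List.getElem?_eq_getElem hk] at hs
        exact Option.some.inj hs
      refine ⟨((k : Int), f.toList[k]), ?_, ?_⟩
      · rw [PySem.List.mem_enumerate_iff]
        exact ⟨k, hk, by simp⟩
      · rw [step _ (by rw [PySem.List.mem_enumerate_iff]; exact ⟨k, hk, by simp⟩)]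
        exact ⟨hv, hor⟩
  rw [hmid]
  rw [pv_dist f.toList.length (fun k => f.toList[k]? = some '/')
    (fun k => PySem.Str.slice f none (some ((k : Int) + 1)) = "src/")
    (fun k => PySem.Str.slice f none (some ((k : Int) + 1)) = "state/")
    (fun k => PySem.Str.slice f none (some ((k : Int) + 1)) = "dreams/")
    (fun k => PySem.Str.slice f none (some ((k : Int) + 1)) = "memories/")
    (fun k => PySem.Str.slice f none (some ((k : Int) + 1)) = ".github/workflows/")]
  rw [← pv_dir_iff f "src/" (by decide) (by decide), ← pv_dir_iff f "state/" (by decide) (by decide),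
      ← pv_dir_iff f "dreams/" (by decide) (by decide),
      ← pv_dir_iff f "memories/" (by decide) (by decide),
      ← pv_dir_iff f ".github/workflows/" (by decide) (by decide)]

-- A's inner loop with break is an 'any' over the pattern list
theorem pvInnerLoop_eq_any (f : String) (l : List String) :
    pvInnerLoop f l = l.any (fun spath =>
      if PySem.Str.endswith spath "/" then PySem.Str.startswith f spath else f == spath) := by
  induction l with
  | nil => rfl
  | cons a t ih =>
    simp only [pvInnerLoop, List.any_cons]
    by_cases he : PySem.Str.endswith a "/" = true
    · rw [if_pos he, if_pos he]
      by_cases hs : PySem.Str.startswith f a = true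
      · rw [if_pos hs, hs, Bool.true_or]
      · have hs' : PySem.Str.startswith f a = false := by rwa [Bool.not_eq_true] at hs
        rw [if_neg hs, hs', Bool.false_or, ih]
    · rw [if_neg he, if_neg he]
      by_cases hq : (f == a) = true
      · rw [if_pos hq, hq, Bool.true_or]
      · have hq' : (f == a) = false := by rwa [Bool.not_eq_true] at hq
        rw [if_neg hq, hq', Bool.false_or, ih]

-- per-file agreement: A's inner pattern loop equals B's slash-scan test
set_option maxHeartbeats 1000000 in
theorem pvTest_eq (f : String) : pvInnerLoop f pvSensitivePaths = pvSensitiveTest f := by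
  have he : pvExact = ["CLAUDE.md", "README.md"] := by decide
  rw [Bool.eq_iff_iff, pvInnerLoop_eq_any]
  unfold pvSensitiveTest
  rw [Bool.or_eq_true, pv_any_iff, he]
  simp only [pvSensitivePaths, List.any_cons, List.any_nil, PySem.Set.contains,
    List.contains_cons, List.contains_nil]
  simp
  try tauto

-- ===== VERDICT (by name: the statement is the Claim_ definition above) =====
theorem find_sensitive_files_py_spec : Claim_equal_find_sensitive_files_py := by
  intro files _
  unfold Spec_find_sensitive_files_py find_sensitive_files_py find_sensitive_files_py_alt
  simp only [pvTest_eq]
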